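-- pv_equiv track=rewrite | github.com/novoseiversia/eee111 | 6/binary_ndigit_z.py | binary_ndigit_z
-- ===== SOURCE A (Python) =====
-- def binary_ndigit_z(n: int, z: int) -> list[str]:
-- 	if n == 1:
-- 		if z == 0:
-- 			return ["1"]
-- 		elif z == 1:
-- 			return ["0"]
-- 		else:
-- 			return []
--
-- 	out: list[str] = []
-- 	for b in binary_ndigit_z(n - 1, z):
-- 		out.append(b + "1")
--
-- 	for b in binary_ndigit_z(n - 1, z - 1):
-- 		out.append(b + "0")
--
-- 	return out
-- ===== SOURCE B (Python) =====
-- def binary_ndigit_z(n: int, z: int) -> list[str]: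
--     # Bottom-up DP over bit-length m, keeping only the zero-counts w that can
--     # still reach exactly z zeros at length n: level[w] holds the m-bit strings
--     # with exactly w zeros, in the recursive enumeration's order.
--     level = {0: ["1"], 1: ["0"]}
--     for m in range(2, n + 1):
--         level = {w: [b + "1" for b in level.get(w, [])] +
--                     [b + "0" for b in level.get(w - 1, [])]
--                  for w in range(max(0, z - (n - m)), min(m, z) + 1)}
--     return level.get(z, [])
-- ===== Notes on version B (the rewrite author's own statement) =====
-- stated objective: faster
-- what changed: Replaces A's exponential double recursion (which recomputes every shared (length, zero-count) subproblem) by a bottom-up dynamic-programming table keyed by zero count, restricted to the zero-counts that can still reach exactly z, so each needed row is built once. Intended as faster; a timing run saw A time out where B returned but could not read a clean ratio at the largest size.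
import Mathlib
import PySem

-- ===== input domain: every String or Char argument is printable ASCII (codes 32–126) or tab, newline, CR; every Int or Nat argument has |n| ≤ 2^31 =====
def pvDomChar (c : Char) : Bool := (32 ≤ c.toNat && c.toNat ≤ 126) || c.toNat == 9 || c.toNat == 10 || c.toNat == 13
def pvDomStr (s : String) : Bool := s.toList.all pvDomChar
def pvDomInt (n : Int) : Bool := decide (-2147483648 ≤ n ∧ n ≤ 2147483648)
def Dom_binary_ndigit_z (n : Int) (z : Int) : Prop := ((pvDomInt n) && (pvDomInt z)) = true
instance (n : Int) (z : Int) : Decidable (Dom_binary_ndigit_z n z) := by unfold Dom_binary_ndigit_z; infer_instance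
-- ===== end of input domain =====

-- B replaces A's exponential double recursion by a bottom-up table over bit-lengths,
-- keeping only the zero-counts that can still reach z, so each row is built once.
-- Intended as faster (asymptotic); a timing run saw A time out where B returned
-- but could not read a clean ratio at the largest size (faster:unconfirmed).

-- ===== PORT A =====
-- literal port of the recursion; the 'n ≤ 0' guard only makes it total: Python
-- recurses forever there (RecursionError, outside Pre_), so nothing is claimed about those inputs.
def binary_ndigit_z (n : Int) (z : Int) : List String :=
  if n ≤ 0 then []
  else if n = 1 then
    if z = 0 then ["1"]
    else if z = 1 then ["0"]
    else []
  else
    let out := (binary_ndigit_z (n - 1) z).foldl (fun acc b => acc ++ [b ++ "1"]) []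
    (binary_ndigit_z (n - 1) (z - 1)).foldl (fun acc b => acc ++ [b ++ "0"]) out
termination_by n.toNat
decreasing_by all_goals omega

-- ===== PORT B =====
def binary_ndigit_z_alt (n : Int) (z : Int) : List String :=
  let init : PySem.Dict Int (List String) := (PySem.Dict.empty.insert 0 ["1"]).insert 1 ["0"]
  let final := (PySem.List.pyRange 2 (n + 1) 1).foldl
    (fun level m =>
      (PySem.List.pyRange (max 0 (z - (n - m))) ((min m z) + 1) 1).foldl
        (fun d w =>
          d.insert w ((level.getD w []).map (fun b => b ++ "1") ++
                      (level.getD (w - 1) []).map (fun b => b ++ "0")))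
        PySem.Dict.empty)
    init
  final.getD z []

-- ===== PRECONDITION & SPEC =====
-- Pre_ excludes exactly n < 1, where A never reaches its base case and raises RecursionError.
def Pre_binary_ndigit_z (n : Int) (z : Int) : Prop := 1 ≤ n
instance (n : Int) (z : Int) : Decidable (Pre_binary_ndigit_z n z) := by unfold Pre_binary_ndigit_z; infer_instance
def pvWitness_binary_ndigit_z : Int × Int := (3, 1)
def Spec_binary_ndigit_z (n : Int) (z : Int) (out : List String) : Prop := out = binary_ndigit_z_alt n z
instance (n : Int) (z : Int) (out : List String) : Decidable (Spec_binary_ndigit_z n z out) := by unfold Spec_binary_ndigit_z; infer_instance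

-- ===== CLAIM (what is proved, stated in full; the proofs are below) =====
def Claim_equal_binary_ndigit_z : Prop := ∀ (n : Int) (z : Int), Dom_binary_ndigit_z n z → Pre_binary_ndigit_z n z → Spec_binary_ndigit_z n z (binary_ndigit_z n z)

-- ===== LEMMAS AND PROOFS =====

-- A's recurrence in map/append form, for n ≥ 2
theorem A_step (n z : Int) (h : 2 ≤ n) :
    binary_ndigit_z n z =
      (binary_ndigit_z (n - 1) z).map (fun b => b ++ "1") ++
      (binary_ndigit_z (n - 1) (z - 1)).map (fun b => b ++ "0") := by
  rw [binary_ndigit_z]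
  rw [if_neg (by omega), if_neg (by omega)]
  simp only [PySem.List.foldl_append_singleton_eq_map, List.nil_append]

-- A's base case in if-form
theorem A_base (w : Int) :
    binary_ndigit_z 1 w = if w = 0 then ["1"] else if w = 1 then ["0"] else [] := by
  rw [binary_ndigit_z]
  rw [if_neg (by omega), if_pos rfl]

-- A returns [] when the zero count is out of range
theorem A_out_of_range (n : Int) (hn : 1 ≤ n) : ∀ z : Int, (z < 0 ∨ n < z) → binary_ndigit_z n z = [] := by
  induction n, hn using Int.le_induction with
  | base =>
    intro z hz
    rw [A_base, if_neg (by omega), if_neg (by omega)]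
  | succ n hn ih =>
    intro z hz
    rw [A_step (n + 1) z (by omega), show (n : Int) + 1 - 1 = n from by omega,
        ih z (by omega), ih (z - 1) (by omega)]
    rfl

-- lookup in a dict rebuilt by inserting g w for each w of a list
theorem getD_foldl_insert_fun (ws : List Int) (g : Int → List String)
    (d0 : PySem.Dict Int (List String)) (x : Int) :
    (ws.foldl (fun d w => d.insert w (g w)) d0).getD x [] =
      if x ∈ ws then g x else d0.getD x [] := by
  induction ws generalizing d0 with
  | nil => simp
  | cons w ws ih =>
    simp only [List.foldl_cons, ih, PySem.Dict.getD_insert, List.mem_cons]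
    by_cases hmem : x ∈ ws
    · simp [hmem]
    · by_cases hx : x = w
      · subst hx; simp [hmem]
      · simp [hmem, hx]

-- the windowed DP table after processing lengths 2..m: inside the window it
-- tabulates A at length m; above m or below 0 the lookup defaults to []
theorem level_inv (n z : Int) : ∀ (m : Int), 1 ≤ m → m ≤ n →
    (∀ w : Int, max 0 (z - (n - m)) ≤ w → w ≤ min m z →
      ((PySem.List.pyRange 2 (m + 1) 1).foldl
        (fun level m =>
          (PySem.List.pyRange (max 0 (z - (n - m))) ((min m z) + 1) 1).foldl
            (fun d w =>
              d.insert w ((level.getD w []).map (fun b => b ++ "1") ++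
                          (level.getD (w - 1) []).map (fun b => b ++ "0")))
            PySem.Dict.empty)
        ((PySem.Dict.empty.insert 0 ["1"]).insert 1 ["0"])).getD w []
      = binary_ndigit_z m w) ∧
    (∀ w : Int, w < 0 ∨ m < w →
      ((PySem.List.pyRange 2 (m + 1) 1).foldl
        (fun level m =>
          (PySem.List.pyRange (max 0 (z - (n - m))) ((min m z) + 1) 1).foldl
            (fun d w =>
              d.insert w ((level.getD w []).map (fun b => b ++ "1") ++
                          (level.getD (w - 1) []).map (fun b => b ++ "0")))
            PySem.Dict.empty)
        ((PySem.Dict.empty.insert 0 ["1"]).insert 1 ["0"])).getD w []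
      = []) := by
  intro m hm
  induction m, hm using Int.le_induction with
  | base =>
    intro _
    rw [PySem.List.pyRange_one_eq_nil (by omega : (1:Int) + 1 ≤ 2)]
    simp only [List.foldl_nil]
    constructor
    · intro w h1 h2
      rw [A_base]
      by_cases h0 : w = 0
      · subst h0; simp [PySem.Dict.getD_insert]
      · have hw1 : w = 1 := by omega
        subst hw1; simp [PySem.Dict.getD_insert]
    · intro w hw
      simp only [PySem.Dict.getD_insert, PySem.Dict.getD_empty]
      rw [if_neg (by omega), if_neg (by omega)]
  | succ m hm ih =>
    intro hmn
    have ih' := ih (by omega)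
    rw [PySem.List.pyRange_one_succ_right (by omega : (2:Int) ≤ m + 1), List.foldl_append]
    simp only [List.foldl_cons, List.foldl_nil]
    constructor
    · intro w h1 h2
      rw [getD_foldl_insert_fun]
      rw [if_pos (by rw [PySem.List.mem_pyRange_one]; omega)]
      rw [A_step (m + 1) w (by omega), show (m:Int) + 1 - 1 = m from by omega]
      by_cases hwm : w ≤ m
      · rw [ih'.1 w (by omega) (by omega)]
        by_cases hw0 : 1 ≤ w
        · rw [ih'.1 (w - 1) (by omega) (by omega)]
        · rw [ih'.2 (w - 1) (by omega), A_out_of_range m (by omega) (w - 1) (by omega)]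
      · rw [ih'.2 w (by omega), A_out_of_range m (by omega) w (by omega)]
        rw [ih'.1 (w - 1) (by omega) (by omega)]
    · intro w hw
      rw [getD_foldl_insert_fun]
      rw [if_neg (by rw [PySem.List.mem_pyRange_one]; omega), PySem.Dict.getD_empty]

-- ===== VERDICT (by name: the statement is the Claim_ definition above) =====
theorem binary_ndigit_z_spec : Claim_equal_binary_ndigit_z := by
  intro n z _ hpre
  unfold Spec_binary_ndigit_z binary_ndigit_z_alt
  have h := level_inv n z n hpre le_rfl
  by_cases hz : 0 ≤ z ∧ z ≤ n
  · exact (h.1 z (by omega) (by omega)).symm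
  · rw [h.2 z (by omega), A_out_of_range n hpre z (by omega)]
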